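-- pv_equiv track=rewrite | github.com/WankoLS/polyomino | polyo.py | allOrientations
-- ===== SOURCE A (Python) =====
-- from copy import deepcopy as copy
--
-- def grid_rotate(grid):
--     w = len(grid[0]) #new grid height
--     h = len(grid) #new grid width
--     result = []
--     for c in range(w): #build a new row for each column in original
--         newrow = []
--         for r in range(h):
--             newrow.append(grid[h-r-1][c])
--         result.append(newrow)
--     return result
--
-- def grid_reflect(grid):
--     return grid[::-1] #vertical reflection is easier to write
--
-- def allOrientations(penta):
--     found = []
--     current = copy(penta)
--
--     while current not in found:
--         cp = copy(current)
--         found.append(cp)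
--
--         current = grid_rotate(current)
--
--     current = grid_reflect(current)
--
--     while current not in found:
--         cp = copy(current)
--         found.append(cp)
--
--         current = grid_rotate(current)
--
--     return found
-- ===== SOURCE B (Python) =====
-- def grid_rotate(grid):
--     w = len(grid[0])
--     h = len(grid)
--     result = []
--     for c in range(w):
--         newrow = []
--         for r in range(h):
--             newrow.append(grid[h-r-1][c])
--         result.append(newrow)
--     return result
--
-- def grid_reflect(grid):
--     return grid[::-1]
--
-- def allOrientations(penta):
--     # dihedral orbit generated explicitly: 4 rotations, then 4 rotations of the
--     # reflection, deduplicated keeping first occurrence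
--     r1 = grid_rotate(penta)
--     r2 = grid_rotate(r1)
--     r3 = grid_rotate(r2)
--     m = grid_reflect(penta)
--     m1 = grid_rotate(m)
--     m2 = grid_rotate(m1)
--     m3 = grid_rotate(m2)
--     result = []
--     for cand in [penta, r1, r2, r3, m, m1, m2, m3]:
--         if cand not in result:
--             result.append(cand)
--     return result
-- ===== Notes on version B (the rewrite author's own statement) =====
-- stated objective: simpler
-- what changed: Replaced A's two cycle-detecting 'while current not in found' loops with explicit generation of the eight dihedral candidates (the four rotations, then the four rotations of the reflection) followed by a single order-preserving deduplication pass.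
-- outside the precondition, e.g. on allOrientations([]): A raises IndexError, B raises IndexError; on allOrientations([[1], [1, 1]]): A returns [[[1], [1, 1]], [[1, 1]], [[1], [1]]], B raises IndexError
import Mathlib
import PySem

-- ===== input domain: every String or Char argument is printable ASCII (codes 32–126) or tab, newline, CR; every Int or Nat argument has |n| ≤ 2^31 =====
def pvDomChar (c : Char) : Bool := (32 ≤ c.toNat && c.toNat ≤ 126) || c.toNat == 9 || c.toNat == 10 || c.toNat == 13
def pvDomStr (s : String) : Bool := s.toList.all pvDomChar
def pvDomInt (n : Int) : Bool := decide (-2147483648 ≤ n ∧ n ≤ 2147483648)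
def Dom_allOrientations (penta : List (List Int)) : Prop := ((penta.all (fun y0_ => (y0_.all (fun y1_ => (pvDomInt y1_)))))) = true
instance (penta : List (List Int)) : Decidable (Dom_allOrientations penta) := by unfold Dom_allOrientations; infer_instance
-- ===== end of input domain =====

-- B replaces A's two cycle-detecting while loops by explicit generation of the eight
-- dihedral candidates (four rotations, then four rotations of the reflection) followed
-- by one order-preserving deduplication pass (objective: simpler).

-- ===== PORT A =====
-- helper: grid_rotate (indexing via PySem.pyGet?; in-range under Pre_)
def gridRotate (grid : List (List Int)) : List (List Int) :=
  let w := ((PySem.List.pyGet? grid 0).getD []).length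
  let h := grid.length
  (List.range w).map (fun (c : Nat) =>
    (List.range h).map (fun (r : Nat) =>
      (PySem.List.pyGet? ((PySem.List.pyGet? grid ((h : Int) - (r : Int) - 1)).getD []) ((c : Int))).getD 0))

-- helper: grid_reflect = grid[::-1] (exact: full reverse slice)
def gridReflect (grid : List (List Int)) : List (List Int) := grid.reverse

-- the 'while current not in found' loop, with fuel to make it total (8 always
-- suffices on Pre_ inputs; the guard order and state are exactly A's)
def loopA : Nat → List (List (List Int)) → List (List Int) →
    List (List (List Int)) × List (List Int)
  | 0, found, current => (found, current)
  | fuel + 1, found, current =>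
    if current ∈ found then (found, current)
    else loopA fuel (found ++ [current]) (gridRotate current)

def allOrientations (penta : List (List Int)) : List (List (List Int)) :=
  let p := loopA 8 [] penta
  (loopA 8 p.1 (gridReflect p.2)).1

-- ===== PORT B =====
def allOrientations_alt (penta : List (List Int)) : List (List (List Int)) :=
  let r1 := gridRotate penta
  let r2 := gridRotate r1
  let r3 := gridRotate r2
  let m := gridReflect penta
  let m1 := gridRotate m
  let m2 := gridRotate m1
  let m3 := gridRotate m2
  [penta, r1, r2, r3, m, m1, m2, m3].foldl
    (fun acc cand => if cand ∈ acc then acc else acc ++ [cand]) []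

-- ===== PRECONDITION & SPEC =====
-- Pre_ admits exactly the non-empty rectangular grids (with at least one column).
-- Excluded: empty grids / zero-width rows (A raises IndexError) and ragged grids, on
-- which grid_rotate silently drops or fabricates cells so A's orbit is an accident of
-- the implementation (B raises IndexError there).
def Pre_allOrientations (penta : List (List Int)) : Prop :=
  0 < penta.length ∧ 0 < (penta.headD []).length ∧
    ∀ row ∈ penta, row.length = (penta.headD []).length
instance (penta : List (List Int)) : Decidable (Pre_allOrientations penta) := by
  unfold Pre_allOrientations; infer_instance
def pvWitness_allOrientations : List (List Int) := [[1, 2], [3, 4]]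
def Spec_allOrientations (penta : List (List Int)) (out : List (List (List Int))) : Prop := out = allOrientations_alt penta
instance (penta : List (List Int)) (out : List (List (List Int))) : Decidable (Spec_allOrientations penta out) := by unfold Spec_allOrientations; infer_instance

-- ===== CLAIM (what is proved, stated in full; the proofs are below) =====
def Claim_equal_allOrientations : Prop := ∀ (penta : List (List Int)), Dom_allOrientations penta → Pre_allOrientations penta → Spec_allOrientations penta (allOrientations penta)

-- ===== LEMMAS AND PROOFS =====

def Rect (g : List (List Int)) (h w : Nat) : Prop :=
  g.length = h ∧ ∀ row ∈ g, row.length = w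

def cell (g : List (List Int)) (i j : Nat) : Int := (g[i]?.getD [])[j]?.getD 0

lemma rotate_eq (g : List (List Int)) (h w : Nat) (hh : g.length = h)
    (hw : ∀ row ∈ g, row.length = w) (h0 : 0 < h) :
    gridRotate g = (List.range w).map (fun c =>
      (List.range h).map (fun r => (g[h - 1 - r]?.getD [])[c]?.getD 0)) := by
  have hlen : 0 < g.length := by omega
  have hw0 : ((PySem.List.pyGet? g 0).getD []).length = w := by
    rw [PySem.List.pyGet?_zero, List.getElem?_eq_getElem hlen]
    exact hw _ (List.getElem_mem hlen)
  unfold gridRotate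
  simp only [hw0, hh]
  refine List.map_congr_left (fun c hc => ?_)
  refine List.map_congr_left (fun r hr => ?_)
  rw [List.mem_range] at hc hr
  have hcast : (h : Int) - (r : Int) - 1 = ((h - 1 - r : Nat) : Int) := by omega
  rw [hcast, PySem.List.pyGet?_natCast, PySem.List.pyGet?_natCast]

lemma rect_rotate {g : List (List Int)} {h w : Nat} (hg : Rect g h w) (h0 : 0 < h) :
    Rect (gridRotate g) w h := by
  rw [rotate_eq g h w hg.1 hg.2 h0]
  constructor
  · simp
  · intro row hrow
    rw [List.mem_map] at hrow
    obtain ⟨c, _, rfl⟩ := hrow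
    simp

lemma cell_rotate {g : List (List Int)} {h w : Nat} (hg : Rect g h w) (h0 : 0 < h)
    {i j : Nat} (hi : i < w) (hj : j < h) :
    cell (gridRotate g) i j = cell g (h - 1 - j) i := by
  rw [rotate_eq g h w hg.1 hg.2 h0]
  simp [cell, hi, hj]

lemma cell_eq_getElem (g : List (List Int)) (i j : Nat) (hi : i < g.length)
    (hj : j < (g[i]'hi).length) : cell g i j = (g[i]'hi)[j]'hj := by
  simp [cell, hi, hj]

lemma rot4 (g : List (List Int)) (h w : Nat) (hg : Rect g h w)
    (h0 : 0 < h) (w0 : 0 < w) :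
    gridRotate (gridRotate (gridRotate (gridRotate g))) = g := by
  have h1 : Rect (gridRotate g) w h := rect_rotate hg h0
  have h2 : Rect (gridRotate (gridRotate g)) h w := rect_rotate h1 w0
  have h3 : Rect (gridRotate (gridRotate (gridRotate g))) w h := rect_rotate h2 h0
  have h4 : Rect (gridRotate (gridRotate (gridRotate (gridRotate g)))) h w :=
    rect_rotate h3 w0
  apply List.ext_getElem (by rw [h4.1, hg.1])
  intro i hi1 hi2
  have hi : i < h := by rw [h4.1] at hi1; exact hi1
  apply List.ext_getElem
  · rw [h4.2 _ (List.getElem_mem hi1), hg.2 _ (List.getElem_mem hi2)]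
  intro j hj1 hj2
  have hj : j < w := by
    have := h4.2 _ (List.getElem_mem hi1); rw [this] at hj1; exact hj1
  rw [← cell_eq_getElem _ _ _ hi1 hj1, ← cell_eq_getElem _ _ _ hi2 hj2]
  rw [cell_rotate h3 w0 hi hj, cell_rotate h2 h0 (by omega) hi,
      cell_rotate h1 w0 (show h - 1 - i < h by omega) (by omega),
      cell_rotate hg h0 (show w - 1 - (w - 1 - j) < w by omega)
        (show h - 1 - i < h by omega)]
  congr 1 <;> omega

lemma mem_dedup_foldl (xs : List (List (List Int))) (acc : List (List (List Int)))
    (x : List (List Int)) :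
    x ∈ List.foldl (fun acc cand => if cand ∈ acc then acc else acc ++ [cand]) acc xs ↔
      x ∈ acc ∨ x ∈ xs := by
  induction xs generalizing acc with
  | nil => simp
  | cons y ys ih =>
    simp only [List.foldl_cons, ih, List.mem_cons]
    by_cases hy : y ∈ acc
    · simp only [if_pos hy]
      constructor
      · tauto
      · rintro (h | h | h) <;> [tauto; (subst h; tauto); tauto]
    · simp only [if_neg hy, List.mem_append, List.mem_singleton]
      tauto

-- A's first while loop: collects the ≤ 4 distinct rotations in order and ends with
-- current = penta again (assuming rot⁴ = id)
lemma loop1_eq (c : List (List Int))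
    (h4 : gridRotate (gridRotate (gridRotate (gridRotate c))) = c) :
    loopA 8 [] c =
      (List.foldl (fun acc cand => if cand ∈ acc then acc else acc ++ [cand]) []
        [c, gridRotate c, gridRotate (gridRotate c),
         gridRotate (gridRotate (gridRotate c))], c) := by
  by_cases e1 : gridRotate c = c
  · simp [loopA, e1]
  · by_cases e2 : gridRotate (gridRotate c) = c
    · have ne21 : gridRotate (gridRotate c) ≠ gridRotate c := by
        intro h
        have h1 := congrArg gridRotate h
        have h2 := congrArg gridRotate h1
        rw [h4] at h2
        exact e1 ((h2.trans h1).trans h).symm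
      simp [loopA, e1, e2]
    · have ne21 : gridRotate (gridRotate c) ≠ gridRotate c := by
        intro h
        have h1 := congrArg gridRotate h
        have h2 := congrArg gridRotate h1
        rw [h4] at h2
        exact e1 ((h2.trans h1).trans h).symm
      by_cases e3 : gridRotate (gridRotate (gridRotate c)) = c
      · have ne31 : gridRotate (gridRotate (gridRotate c)) ≠ gridRotate c := by
          intro h
          have h2 := congrArg gridRotate h
          rw [h4] at h2
          exact e2 h2.symm
        have ne32 : gridRotate (gridRotate (gridRotate c)) ≠ gridRotate (gridRotate c) := by
          intro h
          have h2 := congrArg gridRotate h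
          rw [h4] at h2
          rw [h] at h2
          exact e2 h2.symm
        simp [loopA, e1, e2, e3, ne21]
      · have ne31 : gridRotate (gridRotate (gridRotate c)) ≠ gridRotate c := by
          intro h
          have h2 := congrArg gridRotate h
          rw [h4] at h2
          exact e2 h2.symm
        have ne32 : gridRotate (gridRotate (gridRotate c)) ≠ gridRotate (gridRotate c) := by
          intro h
          have h2 := congrArg gridRotate h
          rw [h4] at h2
          rw [h] at h2
          exact e2 h2.symm
        simp [loopA, e1, e2, e3, ne21, ne31, ne32, h4]

-- A's second while loop, started on a rotation-closed found list
lemma loop2_eq (F : List (List (List Int))) (c : List (List Int))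
    (hcl : ∀ x ∈ F, gridRotate x ∈ F)
    (h4 : gridRotate (gridRotate (gridRotate (gridRotate c))) = c) :
    (loopA 8 F c).1 =
      List.foldl (fun acc cand => if cand ∈ acc then acc else acc ++ [cand]) F
        [c, gridRotate c, gridRotate (gridRotate c),
         gridRotate (gridRotate (gridRotate c))] := by
  by_cases m0 : c ∈ F
  · simp [loopA, m0, hcl _ m0, hcl _ (hcl _ m0), hcl _ (hcl _ (hcl _ m0))]
  · by_cases m1 : gridRotate c ∈ F
    · simp [loopA, m0, m1, hcl _ m1, hcl _ (hcl _ m1)]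
    · by_cases e1 : gridRotate c = c
      · simp [loopA, m0, e1]
      · by_cases m2 : gridRotate (gridRotate c) ∈ F
        · simp [loopA, m0, m1, m2, e1, hcl _ m2]
        · by_cases e2 : gridRotate (gridRotate c) = c
          · have ne21 : gridRotate (gridRotate c) ≠ gridRotate c := by
              intro h
              have h1 := congrArg gridRotate h
              have h2 := congrArg gridRotate h1
              rw [h4] at h2
              exact e1 ((h2.trans h1).trans h).symm
            simp [loopA, m0, m1, e1, e2]
          · have ne21 : gridRotate (gridRotate c) ≠ gridRotate c := by
              intro h
              have h1 := congrArg gridRotate h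
              have h2 := congrArg gridRotate h1
              rw [h4] at h2
              exact e1 ((h2.trans h1).trans h).symm
            by_cases m3 : gridRotate (gridRotate (gridRotate c)) ∈ F
            · simp [loopA, m0, m1, m2, m3, e1, e2, ne21]
            · have ne31 : gridRotate (gridRotate (gridRotate c)) ≠ gridRotate c := by
                intro h
                have h2 := congrArg gridRotate h
                rw [h4] at h2
                exact e2 h2.symm
              have ne32 : gridRotate (gridRotate (gridRotate c)) ≠ gridRotate (gridRotate c) := by
                intro h
                have h2 := congrArg gridRotate h
                rw [h4] at h2
                rw [h] at h2
                exact e2 h2.symm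
              by_cases e3 : gridRotate (gridRotate (gridRotate c)) = c
              · simp [loopA, m0, m1, m2, e1, e2, e3, ne21]
              · simp [loopA, m0, m1, m2, m3, e1, e2, e3, ne21, ne31, ne32, h4]

-- ===== VERDICT (by name: the statement is the Claim_ definition above) =====
theorem allOrientations_spec : Claim_equal_allOrientations := by
  intro penta _ hpre
  unfold Spec_allOrientations
  obtain ⟨h0, w0, hw⟩ := hpre
  have hrect : Rect penta penta.length (penta.headD []).length := ⟨rfl, hw⟩
  have hrefl : Rect (gridReflect penta) penta.length (penta.headD []).length := by
    constructor
    · simp [gridReflect]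
    · intro row hrow
      rw [gridReflect, List.mem_reverse] at hrow
      exact hw row hrow
  have h4p := rot4 penta _ _ hrect h0 w0
  have h4m := rot4 (gridReflect penta) _ _ hrefl (by simpa [gridReflect] using h0) w0
  have hS : ∀ x ∈ List.foldl (fun acc cand => if cand ∈ acc then acc else acc ++ [cand]) []
      [penta, gridRotate penta, gridRotate (gridRotate penta),
       gridRotate (gridRotate (gridRotate penta))],
      gridRotate x ∈ List.foldl (fun acc cand => if cand ∈ acc then acc else acc ++ [cand]) []
      [penta, gridRotate penta, gridRotate (gridRotate penta),
       gridRotate (gridRotate (gridRotate penta))] := by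
    intro x hx
    rw [mem_dedup_foldl] at hx ⊢
    rcases hx with h | hx
    · simp at h
    · simp only [List.mem_cons, List.not_mem_nil] at hx
      rcases hx with rfl | rfl | rfl | hx
      · simp
      · simp
      · simp
      · simp at hx; subst hx; simp [h4p]
  show allOrientations penta = allOrientations_alt penta
  unfold allOrientations allOrientations_alt
  rw [loop1_eq penta h4p]
  simp only
  rw [loop2_eq _ _ hS h4m]
  rw [show ([penta, gridRotate penta, gridRotate (gridRotate penta),
        gridRotate (gridRotate (gridRotate penta)), gridReflect penta,
        gridRotate (gridReflect penta), gridRotate (gridRotate (gridReflect penta)),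
        gridRotate (gridRotate (gridRotate (gridReflect penta)))] :
        List (List (List Int))) =
      [penta, gridRotate penta, gridRotate (gridRotate penta),
        gridRotate (gridRotate (gridRotate penta))] ++
      [gridReflect penta, gridRotate (gridReflect penta),
        gridRotate (gridRotate (gridReflect penta)),
        gridRotate (gridRotate (gridRotate (gridReflect penta)))] from rfl,
    List.foldl_append]
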